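-- pv_equiv track=rewrite | github.com/xiaoxiaostudy/star | agents/model_agent.py | _fuzzy_match_model
-- ===== SOURCE A (Python) =====
-- from typing import Dict, Any, Optional, List
--
-- def _fuzzy_match_model(model_name: str, models: Dict) -> tuple:
--     """Fuzzy match model name, returns (model_info, matched_name)"""
--     def normalize(name: str) -> str:
--         return name.lower().replace(" ", "").replace("_", "").replace("-", "").replace(".", "")
--
--     target = normalize(model_name)
--
--     for name, info in models.items():
--         if normalize(name) == target:
--             return (info, name)
--
--     for name, info in models.items():
--         normalized = normalize(name)
--         if target in normalized or normalized in target: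
--             return (info, name)
--
--     return (None, None)
-- ===== SOURCE B (Python) =====
-- def _fuzzy_match_model(model_name: str, models) -> tuple:
--     """Fuzzy match model name, returns (model_info, matched_name)"""
--     def normalize(name: str) -> str:
--         return name.lower().replace(" ", "").replace("_", "").replace("-", "").replace(".", "")
--
--     target = normalize(model_name)
--     fallback = None
--     for name, info in models.items():
--         normalized = normalize(name)
--         if normalized == target:
--             return (info, name)
--         if fallback is None and (target in normalized or normalized in target):
--             fallback = (info, name)
--     return fallback if fallback is not None else (None, None)
-- ===== Notes on version B (the rewrite author's own statement) =====
-- stated objective: alternative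
-- what changed: Fuses A's two passes into one loop that normalizes each key once, returning on an exact match and recording the first substring match as a fallback; same cost in practice.
import Mathlib
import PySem

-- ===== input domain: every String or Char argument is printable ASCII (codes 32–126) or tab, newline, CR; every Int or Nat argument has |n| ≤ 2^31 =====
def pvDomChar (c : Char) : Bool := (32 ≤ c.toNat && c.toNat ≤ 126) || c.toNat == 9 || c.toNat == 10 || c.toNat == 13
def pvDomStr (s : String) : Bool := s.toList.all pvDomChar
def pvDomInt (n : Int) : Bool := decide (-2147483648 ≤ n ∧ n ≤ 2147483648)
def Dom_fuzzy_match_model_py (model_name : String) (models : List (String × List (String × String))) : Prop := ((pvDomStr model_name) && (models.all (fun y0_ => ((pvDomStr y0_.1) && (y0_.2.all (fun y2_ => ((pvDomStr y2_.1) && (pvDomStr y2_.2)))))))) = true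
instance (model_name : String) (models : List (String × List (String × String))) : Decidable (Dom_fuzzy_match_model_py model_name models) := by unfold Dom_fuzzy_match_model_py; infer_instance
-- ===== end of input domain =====

-- B fuses A's two passes into one loop, normalizing each key once and keeping the first substring match as a fallback (objective: alternative single-pass decomposition).

-- ===== PORT A =====
-- normalize(name): lower then strip " ", "_", "-", "."
def pvNormalize (s : String) : String :=
  ((((PySem.Str.lower s).replace " " "").replace "_" "").replace "-" "").replace "." ""

-- first pass of A: first exact (normalized) match
def pvScanExact (target : String) : List (String × List (String × String)) → Option (List (String × String) × String)
  | [] => none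
  | (name, info) :: rest =>
    if pvNormalize name == target then some (info, name) else pvScanExact target rest

-- second pass of A: first substring match
def pvScanSub (target : String) : List (String × List (String × String)) → Option (List (String × String) × String)
  | [] => none
  | (name, info) :: rest =>
    let normalized := pvNormalize name
    if PySem.Str.isIn target normalized || PySem.Str.isIn normalized target then some (info, name)
    else pvScanSub target rest

def fuzzy_match_model_py (model_name : String) (models : List (String × List (String × String))) : (Option (List (String × String))) × Option String :=
  let target := pvNormalize model_name
  match pvScanExact target models with
  | some (info, name) => (some info, some name)
  | none =>
    match pvScanSub target models with
    | some (info, name) => (some info, some name)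
    | none => (none, none)

-- ===== PORT B =====
-- B's single loop: return on exact match, record first substring match in `fallback`
def pvFuse (target : String) (fallback : Option (List (String × String) × String)) :
    List (String × List (String × String)) → (Option (List (String × String))) × Option String
  | [] =>
    match fallback with
    | some (info, name) => (some info, some name)
    | none => (none, none)
  | (name, info) :: rest =>
    let normalized := pvNormalize name
    if normalized == target then (some info, some name)
    else
      let fb := if fallback.isNone && (PySem.Str.isIn target normalized || PySem.Str.isIn normalized target)
                then some (info, name) else fallback
      pvFuse target fb rest

def fuzzy_match_model_py_alt (model_name : String) (models : List (String × List (String × String))) : (Option (List (String × String))) × Option String :=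
  pvFuse (pvNormalize model_name) none models

-- ===== PRECONDITION & SPEC =====
def Spec_fuzzy_match_model_py (model_name : String) (models : List (String × List (String × String))) (out : (Option (List (String × String))) × Option String) : Prop := out = fuzzy_match_model_py_alt model_name models
instance (model_name : String) (models : List (String × List (String × String))) (out : (Option (List (String × String))) × Option String) : Decidable (Spec_fuzzy_match_model_py model_name models out) := by unfold Spec_fuzzy_match_model_py; infer_instance

-- ===== CLAIM (what is proved, stated in full; the proofs are below) =====
def Claim_equal_fuzzy_match_model_py : Prop := ∀ (model_name : String) (models : List (String × List (String × String))), Dom_fuzzy_match_model_py model_name models → Spec_fuzzy_match_model_py model_name models (fuzzy_match_model_py model_name models)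

-- ===== LEMMAS AND PROOFS =====

-- the fused loop equals: exact pass, then pending fallback, then substring pass
lemma pvFuse_eq (target : String) (l : List (String × List (String × String)))
    (fb : Option (List (String × String) × String)) :
    pvFuse target fb l =
      match pvScanExact target l with
      | some (info, name) => (some info, some name)
      | none =>
        match fb with
        | some (info, name) => (some info, some name)
        | none =>
          match pvScanSub target l with
          | some (info, name) => (some info, some name)
          | none => (none, none) := by
  induction l generalizing fb with
  | nil => cases fb <;> simp [pvFuse, pvScanExact, pvScanSub]
  | cons hd tl ih =>
    obtain ⟨name, info⟩ := hd
    by_cases he : pvNormalize name == target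
    · simp [pvFuse, pvScanExact, he]
    · by_cases hs : PySem.Chars.isIn target.toList (pvNormalize name).toList = true ∨
          PySem.Chars.isIn (pvNormalize name).toList target.toList = true
      · cases fb with
        | none => simp [pvFuse, pvScanExact, pvScanSub, he, hs, ih]
        | some p => simp [pvFuse, pvScanExact, he, ih]
      · cases fb with
        | none => simp [pvFuse, pvScanExact, pvScanSub, he, hs, ih]
        | some p => simp [pvFuse, pvScanExact, he, ih]

-- ===== VERDICT (by name: the statement is the Claim_ definition above) =====
theorem fuzzy_match_model_py_spec : Claim_equal_fuzzy_match_model_py := by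
  intro model_name models _
  unfold Spec_fuzzy_match_model_py fuzzy_match_model_py fuzzy_match_model_py_alt
  rw [pvFuse_eq]
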